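-- pv_equiv track=rewrite | github.com/robpdesign/Obsidiantelesync | telegram-obsidian-sync/local-sync/sync_thoughts.py | merge_content
-- ===== SOURCE A (Python) =====
-- def merge_content(existing, new_formatted):
--     """
--     Merge new thoughts into existing content.
--     Inserts new entries under existing date headers or adds new headers.
--     """
--     if not new_formatted.strip():
--         return existing
--
--     if not existing.strip():
--         return new_formatted
--
--     # Parse existing content into sections by date
--     existing_sections = {}
--     current_date = None
--     current_lines = []
--
--     for line in existing.split("\n"):
--         if line.startswith("## "):
--             if current_date:
--                 existing_sections[current_date] = current_lines
--             current_date = line[3:].strip()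
--             current_lines = []
--         elif current_date:
--             if line.strip():  # Skip empty lines for storage
--                 current_lines.append(line)
--
--     if current_date:
--         existing_sections[current_date] = current_lines
--
--     # Parse new content
--     new_sections = {}
--     current_date = None
--     current_lines = []
--
--     for line in new_formatted.split("\n"):
--         if line.startswith("## "):
--             if current_date:
--                 new_sections[current_date] = current_lines
--             current_date = line[3:].strip()
--             current_lines = []
--         elif current_date:
--             if line.strip():
--                 current_lines.append(line)
--
--     if current_date:
--         new_sections[current_date] = current_lines
--
--     # Merge: add new entries to existing dates, or create new date sections
--     for date, entries in new_sections.items():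
--         if date in existing_sections:
--             existing_sections[date].extend(entries)
--         else:
--             existing_sections[date] = entries
--
--     # Rebuild the file, sorted by date (newest first)
--     output_lines = []
--     for date in sorted(existing_sections.keys(), reverse=True):
--         output_lines.append(f"## {date}")
--         # Sort entries within each date by time
--         sorted_entries = sorted(existing_sections[date])
--         output_lines.extend(sorted_entries)
--         output_lines.append("")
--
--     return "\n".join(output_lines)
-- ===== SOURCE B (Python) =====
-- def _parse(text):
--     """Group a block's lines by '## ' headers: span-based scan, no per-line state machine."""
--     sections = {}
--     lines = text.split("\n")
--     n = len(lines)
--     i = 0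
--     while i < n and not lines[i].startswith("## "):
--         i += 1  # drop preamble before the first header
--     while i < n:
--         date = lines[i][3:].strip()
--         j = i + 1
--         while j < n and not lines[j].startswith("## "):
--             j += 1
--         if date:  # an empty date ('## ') opens no section, as in the original
--             sections[date] = [l for l in lines[i + 1:j] if l.strip()]
--         i = j
--     return sections
--
--
-- def merge_content(existing, new_formatted):
--     """
--     Merge new thoughts into existing content.
--     Inserts new entries under existing date headers or adds new headers.
--     """
--     if not new_formatted.strip():
--         return existing
--     if not existing.strip():
--         return new_formatted
--     sections = _parse(existing)
--     for date, entries in _parse(new_formatted).items():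
--         sections[date] = sections.get(date, []) + entries
--     return "\n".join(
--         "\n".join(["## " + date] + sorted(sections[date]) + [""])
--         for date in sorted(sections, reverse=True)
--     )
-- ===== Notes on version B (the rewrite author's own statement) =====
-- stated objective: alternative
-- what changed: Replaced A's two duplicated per-line state-machine parsing loops (sections/current_date/current_lines accumulator) by one span-based grouping parser that drops the preamble and cuts the line list at each '## ' header, and replaced the foldl line-accumulating rebuild by rendering each section to a string and joining the sections.
import Mathlib
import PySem

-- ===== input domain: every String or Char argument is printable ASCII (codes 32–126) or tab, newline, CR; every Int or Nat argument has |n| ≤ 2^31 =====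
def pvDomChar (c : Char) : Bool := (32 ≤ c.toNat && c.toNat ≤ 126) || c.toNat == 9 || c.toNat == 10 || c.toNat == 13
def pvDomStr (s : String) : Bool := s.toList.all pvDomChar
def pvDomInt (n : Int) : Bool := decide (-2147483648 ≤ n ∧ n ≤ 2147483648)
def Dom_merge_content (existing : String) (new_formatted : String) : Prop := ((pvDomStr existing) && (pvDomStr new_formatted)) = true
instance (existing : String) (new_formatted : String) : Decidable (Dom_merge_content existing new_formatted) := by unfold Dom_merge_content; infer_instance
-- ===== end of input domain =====

-- B replaces A's per-line state-machine parsers by a single span-based grouping parser and a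
-- join-of-sections rebuild: a different decomposition of the same merge (objective: alternative).

-- shared literal translations of elementary Python expressions used by both sources
def pvIsHeader (line : String) : Bool := PySem.Str.startswith line "## "       -- line.startswith("## ")
def pvNotHeader (line : String) : Bool := !pvIsHeader line
def pvDate (line : String) : String := PySem.Str.strip (PySem.Str.slice line (some 3) none)  -- line[3:].strip()
def pvKeep (line : String) : Bool := PySem.Str.strip line != ""                -- bool(line.strip())
def pvLines (text : String) : List String := (PySem.Str.split? text "\n").getD []  -- text.split("\n"); sep ≠ "" so never none

-- ===== PORT A =====
-- the body of A's two identical for-loops: state = (sections, current_date, current_lines);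
-- Python's `if current_date:` is the truthiness test current_date ≠ "" (None and "" behave alike here)
def pvStepA (st : PySem.Dict String (List String) × String × List String) (line : String) :
    PySem.Dict String (List String) × String × List String :=
  match st with
  | (sections, cd, cls) =>
    if pvIsHeader line then
      ((if cd ≠ "" then sections.insert cd cls else sections), pvDate line, ([] : List String))
    else if cd ≠ "" then
      (sections, cd, if pvKeep line then cls ++ [line] else cls)
    else
      (sections, cd, cls)

-- the trailing `if current_date: sections[current_date] = current_lines`
def pvFinA (st : PySem.Dict String (List String) × String × List String) :
    PySem.Dict String (List String) :=
  if st.2.1 ≠ "" then st.1.insert st.2.1 st.2.2 else st.1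

-- A's parse loop (written twice in A for existing and new content)
def pvParseA (text : String) : PySem.Dict String (List String) :=
  pvFinA ((pvLines text).foldl pvStepA (PySem.Dict.empty, "", ([] : List String)))

-- for date, entries in new_sections.items(): extend existing date or create it
def pvMergeA (d nd : PySem.Dict String (List String)) : PySem.Dict String (List String) :=
  nd.items.foldl
    (fun d p => if d.contains p.1 then d.insert p.1 (d.getD p.1 [] ++ p.2) else d.insert p.1 p.2) d

-- rebuild: header line, sorted entries, blank line, for dates sorted newest first
def pvBuildA (d : PySem.Dict String (List String)) : List String :=
  (PySem.List.sorted d.keys (fun x => x) true).foldl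
    (fun acc date =>
      acc ++ (("## " ++ date) :: (PySem.List.sorted (d.getD date []) (fun x => x) false ++ [""]))) []

def merge_content (existing : String) (new_formatted : String) : String :=
  if PySem.Str.strip new_formatted = "" then existing
  else if PySem.Str.strip existing = "" then new_formatted
  else
    PySem.Str.join "\n" (pvBuildA (pvMergeA (pvParseA existing) (pvParseA new_formatted)))

-- ===== PORT B =====
-- Source B's outer while loop: the current line is a header; its section body is the span of
-- following non-header lines, and the loop resumes at the next header
def pvParseLoopB (d : PySem.Dict String (List String)) :
    List String → PySem.Dict String (List String)
  | [] => d
  | line :: rest =>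
    pvParseLoopB
      (if pvDate line ≠ "" then
        d.insert (pvDate line) ((rest.takeWhile pvNotHeader).filter pvKeep)
      else d)
      (rest.dropWhile pvNotHeader)
termination_by lines => lines.length
decreasing_by
  simp only [List.length_cons]
  exact Nat.lt_succ_of_le (List.length_dropWhile_le _ _)

-- _parse: drop the preamble before the first header, then group span by span
def pvParseB (text : String) : PySem.Dict String (List String) :=
  pvParseLoopB PySem.Dict.empty ((pvLines text).dropWhile pvNotHeader)

-- sections[date] = sections.get(date, []) + entries
def pvMergeB (d nd : PySem.Dict String (List String)) : PySem.Dict String (List String) :=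
  nd.items.foldl (fun d p => d.insert p.1 (d.getD p.1 [] ++ p.2)) d

-- the lines of one rendered section
def pvSectionB (d : PySem.Dict String (List String)) (date : String) : List String :=
  ("## " ++ date) :: (PySem.List.sorted (d.getD date []) (fun x => x) false ++ [""])

def merge_content_alt (existing : String) (new_formatted : String) : String :=
  if PySem.Str.strip new_formatted = "" then existing
  else if PySem.Str.strip existing = "" then new_formatted
  else
    let m := pvMergeB (pvParseB existing) (pvParseB new_formatted)
    PySem.Str.join "\n"
      ((PySem.List.sorted m.keys (fun x => x) true).map
        (fun date => PySem.Str.join "\n" (pvSectionB m date)))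

-- ===== PRECONDITION & SPEC =====
def Spec_merge_content (existing : String) (new_formatted : String) (out : String) : Prop := out = merge_content_alt existing new_formatted
instance (existing : String) (new_formatted : String) (out : String) : Decidable (Spec_merge_content existing new_formatted out) := by unfold Spec_merge_content; infer_instance

-- ===== CLAIM (what is proved, stated in full; the proofs are below) =====
def Claim_equal_merge_content : Prop := ∀ (existing : String) (new_formatted : String), Dom_merge_content existing new_formatted → Spec_merge_content existing new_formatted (merge_content existing new_formatted)

-- ===== LEMMAS AND PROOFS =====

-- A's state machine, finalized, equals B's span grouping resumed from the current partial section
lemma pv_scan_eq (lines : List String) :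
    ∀ (d : PySem.Dict String (List String)) (cd : String) (cl : List String),
      pvFinA (lines.foldl pvStepA (d, cd, cl)) =
      pvParseLoopB (pvFinA (d, cd, cl ++ (lines.takeWhile pvNotHeader).filter pvKeep))
        (lines.dropWhile pvNotHeader) := by
  induction lines with
  | nil =>
    intro d cd cl
    simp [pvParseLoopB]
  | cons l rest ih =>
    intro d cd cl
    cases hl : pvIsHeader l with
    | false =>
      have hnh : pvNotHeader l = true := by simp [pvNotHeader, hl]
      simp only [List.foldl_cons, List.takeWhile_cons, List.dropWhile_cons, hnh, if_true,
        List.filter_cons]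
      by_cases hcd : cd = ""
      · subst hcd
        simp only [pvStepA, hl, Bool.false_eq_true, if_false, ne_eq, not_true_eq_false]
        rw [ih]
        cases hk : pvKeep l <;> simp [pvFinA]
      · simp only [pvStepA, hl, Bool.false_eq_true, if_false, ne_eq, hcd, not_false_eq_true,
          if_true]
        rw [ih]
        cases hk : pvKeep l
        · simp
        · simp only [if_true, List.append_assoc, List.singleton_append]
    | true =>
      have hnh : pvNotHeader l = false := by simp [pvNotHeader, hl]
      simp only [List.foldl_cons, List.takeWhile_cons, List.dropWhile_cons, hnh,
        Bool.false_eq_true, if_false, List.filter_nil, List.append_nil]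
      simp only [pvStepA, hl, if_true]
      rw [ih]
      rw [pvParseLoopB]
      simp [pvFinA]
    
lemma pv_parse_eq (text : String) : pvParseA text = pvParseB text := by
  unfold pvParseA pvParseB
  rw [pv_scan_eq]
  simp [pvFinA]

lemma pv_merge_eq (d nd : PySem.Dict String (List String)) : pvMergeA d nd = pvMergeB d nd := by
  unfold pvMergeA pvMergeB
  have h : (fun (d : PySem.Dict String (List String)) (p : String × List String) =>
      if d.contains p.1 then d.insert p.1 (d.getD p.1 [] ++ p.2) else d.insert p.1 p.2) =
      fun d p => d.insert p.1 (d.getD p.1 [] ++ p.2) := by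
    funext d p
    cases hc : d.contains p.1
    · simp [PySem.Dict.getD_of_not_contains _ _ hc]
    · simp
  rw [h]

lemma pv_ofList_cons (c : Char) (l : List Char) :
    String.ofList (c :: l) = String.ofList [c] ++ String.ofList l := by
  rw [show c :: l = [c] ++ l from rfl]; rw [String.ofList_append]

lemma pv_join_cons_cons (a b : String) (rest : List String) :
    PySem.Str.join "\n" (a :: b :: rest) = a ++ "\n" ++ PySem.Str.join "\n" (b :: rest) := by
  have h : String.ofList ['\n'] = "\n" := by decide
  simp [PySem.Str.join, PySem.Chars.join_cons_cons]
  rw [String.append_assoc]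
  congr 1
  rw [pv_ofList_cons, h]

lemma pv_join_singleton (a : String) : PySem.Str.join "\n" [a] = a := by
  simp [PySem.Str.join, PySem.Chars.join_singleton]

lemma pv_join_append (xs : List String) :
    ∀ (ys : List String), xs ≠ [] → ys ≠ [] →
      PySem.Str.join "\n" (xs ++ ys) =
      PySem.Str.join "\n" xs ++ "\n" ++ PySem.Str.join "\n" ys := by
  induction xs with
  | nil => intro ys hx _; exact absurd rfl hx
  | cons a xs ih =>
    intro ys _ hy
    cases xs with
    | nil =>
      cases ys with
      | nil => exact absurd rfl hy
      | cons b t => simp [pv_join_cons_cons, pv_join_singleton]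
    | cons c xs' =>
      have h1 : PySem.Str.join "\n" ((a :: c :: xs') ++ ys) =
          a ++ "\n" ++ PySem.Str.join "\n" ((c :: xs') ++ ys) := by
        simp only [List.cons_append]
        exact pv_join_cons_cons a c (xs' ++ ys)
      rw [h1, ih ys (List.cons_ne_nil _ _) hy, pv_join_cons_cons]
      simp [String.append_assoc]

lemma pv_join_flatMap (g : String → List String) (hg : ∀ k, g k ≠ []) :
    ∀ (ks : List String),
      PySem.Str.join "\n" (ks.flatMap g) =
      PySem.Str.join "\n" (ks.map (fun k => PySem.Str.join "\n" (g k))) := by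
  intro ks
  induction ks with
  | nil => rfl
  | cons k ks ih =>
    cases ks with
    | nil => simp [pv_join_singleton]
    | cons k' t =>
      have hne : (k' :: t).flatMap g ≠ [] := by
        have := hg k'
        simp only [List.flatMap_cons]
        intro h
        exact this (List.append_eq_nil_iff.mp h).1
      have h1 : (k :: k' :: t).flatMap g = g k ++ (k' :: t).flatMap g := by
        simp [List.flatMap_cons]
      rw [h1, pv_join_append (g k) _ (hg k) hne, ih]
      simp only [List.map_cons]
      rw [pv_join_cons_cons]

-- ===== VERDICT (by name: the statement is the Claim_ definition above) =====
theorem merge_content_spec : Claim_equal_merge_content := by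
  intro existing new_formatted _
  unfold Spec_merge_content merge_content merge_content_alt
  by_cases h1 : PySem.Str.strip new_formatted = ""
  · simp [h1]
  · by_cases h2 : PySem.Str.strip existing = ""
    · simp [h1, h2]
    · simp only [h1, h2, if_false]
      rw [pv_parse_eq existing, pv_parse_eq new_formatted, pv_merge_eq]
      unfold pvBuildA
      rw [PySem.List.foldl_append_eq_flatMap]
      simp only [List.nil_append, pvSectionB]
      exact pv_join_flatMap _ (fun k => List.cons_ne_nil _ _) _
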